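-- pv_equiv track=rewrite | github.com/htang7415/Code-Lab | modules/ai-agents/evaluation/security-and-red-team-evals/python/security_and_red_team_evals.py | high_risk_failure_count
-- ===== SOURCE A (Python) =====
-- DEFAULT_HIGH_RISK_LABELS = [
--     "prompt_injection",
--     "data_exfiltration",
--     "privilege_escalation",
--     "unsafe_action",
-- ]
--
-- def high_risk_failure_count(
--     breakdown: dict[str, int],
--     high_risk_labels: list[str] | None = None,
-- ) -> int:
--     if not breakdown:
--         raise ValueError("breakdown must be non-empty")
--
--     labels = high_risk_labels or DEFAULT_HIGH_RISK_LABELS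
--     high_risk = {label.strip().lower() for label in labels if label.strip()}
--     return sum(count for label, count in breakdown.items() if label in high_risk)
-- ===== SOURCE B (Python) =====
-- DEFAULT_HIGH_RISK_LABELS = [
--     "prompt_injection",
--     "data_exfiltration",
--     "privilege_escalation",
--     "unsafe_action",
-- ]
--
-- def high_risk_failure_count(
--     breakdown: dict[str, int],
--     high_risk_labels: list[str] | None = None,
-- ) -> int:
--     if not breakdown:
--         raise ValueError("breakdown must be non-empty")
--
--     labels = high_risk_labels or DEFAULT_HIGH_RISK_LABELS
--     # single pass over the labels: normalize, dedup on the fly, and probe the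
--     # breakdown dict by key -- the breakdown is never scanned
--     seen = set()
--     total = 0
--     for label in labels:
--         norm = label.strip().lower()
--         if not norm or norm in seen:
--             continue
--         seen.add(norm)
--         total += breakdown.get(norm, 0)
--     return total
-- ===== Notes on version B (the rewrite author's own statement) =====
-- stated objective: alternative
-- what changed: A builds a normalized label set and then scans every breakdown entry filtering by membership; B makes a single accumulator loop over the labels, deduplicating on the fly and probing the breakdown dict by key, so the breakdown is never traversed.
-- outside the precondition, e.g. on high_risk_failure_count({}, None): A raises ValueError, B raises ValueError
import Mathlib
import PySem

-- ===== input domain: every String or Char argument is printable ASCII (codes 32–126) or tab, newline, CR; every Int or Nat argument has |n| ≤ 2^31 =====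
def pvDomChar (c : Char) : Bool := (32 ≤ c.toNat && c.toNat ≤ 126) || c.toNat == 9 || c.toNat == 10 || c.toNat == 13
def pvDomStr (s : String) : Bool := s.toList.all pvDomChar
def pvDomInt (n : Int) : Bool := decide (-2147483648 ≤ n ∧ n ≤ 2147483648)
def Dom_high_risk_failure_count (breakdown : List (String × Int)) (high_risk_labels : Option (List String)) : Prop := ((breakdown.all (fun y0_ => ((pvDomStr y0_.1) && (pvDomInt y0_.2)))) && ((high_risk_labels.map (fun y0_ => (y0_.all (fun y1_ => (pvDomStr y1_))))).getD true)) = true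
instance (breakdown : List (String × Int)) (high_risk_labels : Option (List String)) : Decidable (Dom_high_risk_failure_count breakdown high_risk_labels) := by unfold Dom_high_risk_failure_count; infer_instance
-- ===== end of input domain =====

-- B replaces A's set comprehension + breakdown scan by one accumulator loop over the
-- labels that normalizes, dedups on the fly and probes the breakdown dict by key
-- (an alternative traversal; same result, proved below).

-- shared module constant DEFAULT_HIGH_RISK_LABELS
def pvDefaultHighRiskLabels : List String :=
  ["prompt_injection", "data_exfiltration", "privilege_escalation", "unsafe_action"]

-- 'labels = high_risk_labels or DEFAULT_HIGH_RISK_LABELS' (identical line in A and B)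
def pvLabels (high_risk_labels : Option (List String)) : List String :=
  match high_risk_labels with
  | some l => if l.isEmpty then pvDefaultHighRiskLabels else l
  | none => pvDefaultHighRiskLabels

-- ===== PORT A =====
-- A: high_risk = {l.strip().lower() for l in labels if l.strip()};
--    sum(count for label, count in breakdown.items() if label in high_risk)
def high_risk_failure_count (breakdown : List (String × Int)) (high_risk_labels : Option (List String)) : Int :=
  let labels := pvLabels high_risk_labels
  let high_risk : PySem.Set String :=
    PySem.Set.ofList
      ((labels.filter (fun label => PySem.Str.strip label ≠ "")).map
        (fun label => PySem.Str.lower (PySem.Str.strip label)))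
  ((breakdown.filter (fun p => PySem.Set.contains high_risk p.1)).map (fun p => p.2)).sum

-- ===== PORT B =====
-- B: seen = set(); total = 0
--    for label in labels: norm = label.strip().lower()
--        if not norm or norm in seen: continue
--        seen.add(norm); total += breakdown.get(norm, 0)
--    return total
def high_risk_failure_count_alt (breakdown : List (String × Int)) (high_risk_labels : Option (List String)) : Int :=
  let d := PySem.Dict.mk breakdown
  ((pvLabels high_risk_labels).foldl
    (fun (st : PySem.Set String × Int) label =>
      let norm := PySem.Str.lower (PySem.Str.strip label)
      if norm = "" ∨ PySem.Set.contains st.1 norm then st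
      else (PySem.Set.add st.1 norm, st.2 + PySem.Dict.getD d norm 0))
    (PySem.Set.empty, 0)).2

-- ===== PRECONDITION & SPEC =====
-- breakdown ≠ [] excludes exactly the empty dict, on which A raises ValueError (B raises too);
-- the Nodup condition only mirrors the Python dict type (no Python dict has duplicate keys).
def Pre_high_risk_failure_count (breakdown : List (String × Int)) (high_risk_labels : Option (List String)) : Prop :=
  breakdown ≠ [] ∧ (breakdown.map (fun p => p.1)).Nodup

instance (breakdown : List (String × Int)) (high_risk_labels : Option (List String)) : Decidable (Pre_high_risk_failure_count breakdown high_risk_labels) := by unfold Pre_high_risk_failure_count; infer_instance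

def pvWitness_high_risk_failure_count : (List (String × Int)) × Option (List String) :=
  ([("prompt_injection", 3), ("other", 5)], none)

def Spec_high_risk_failure_count (breakdown : List (String × Int)) (high_risk_labels : Option (List String)) (out : Int) : Prop := out = high_risk_failure_count_alt breakdown high_risk_labels
instance (breakdown : List (String × Int)) (high_risk_labels : Option (List String)) (out : Int) : Decidable (Spec_high_risk_failure_count breakdown high_risk_labels out) := by unfold Spec_high_risk_failure_count; infer_instance

-- ===== CLAIM (what is proved, stated in full; the proofs are below) =====
def Claim_equal_high_risk_failure_count : Prop := ∀ (breakdown : List (String × Int)) (high_risk_labels : Option (List String)), Dom_high_risk_failure_count breakdown high_risk_labels → Pre_high_risk_failure_count breakdown high_risk_labels → Spec_high_risk_failure_count breakdown high_risk_labels (high_risk_failure_count breakdown high_risk_labels)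

-- ===== LEMMAS AND PROOFS =====

-- lower maps character-wise, so it sends only "" to ""
theorem pv_lower_eq_empty_iff (s : String) : (PySem.Str.lower s = "") ↔ s = "" := by
  rw [← String.toList_inj]
  simp [PySem.Str.lower, PySem.Chars.lower]

-- getD on a dict whose key list misses k is the default
theorem pv_getD_not_mem (bd : List (String × Int)) (k : String)
    (h : k ∉ bd.map (fun p => p.1)) : PySem.Dict.getD (PySem.Dict.mk bd) k 0 = 0 := by
  induction bd with
  | nil => rfl
  | cons p rest ih =>
    obtain ⟨a, v⟩ := p
    simp only [List.map_cons, List.mem_cons, not_or] at h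
    rw [PySem.Dict.getD_eq_get?_getD, PySem.Dict.get?_mk_cons]
    have hne : (a == k) = false := by simp [Ne.symm h.1]
    rw [hne, if_neg (by simp), ← PySem.Dict.getD_eq_get?_getD]
    exact ih h.2

-- summing an indicator over a duplicate-free list
theorem pv_sum_indicator (S : List String) (k : String) (v : Int) (hS : S.Nodup) :
    (S.map (fun l => if l = k then v else 0)).sum = if k ∈ S then v else 0 := by
  induction S with
  | nil => simp
  | cons s rest ih =>
    simp only [List.nodup_cons] at hS
    by_cases hsk : s = k
    · subst hsk
      simp [hS.1, ih hS.2]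
    · simp [hsk, Ne.symm hsk, ih hS.2]

-- scanning the breakdown and filtering by membership in S equals probing the
-- breakdown once per element of S (keys and S duplicate-free)
theorem pv_exchange (S : List String) (bd : List (String × Int))
    (hS : S.Nodup) (hbd : (bd.map (fun p => p.1)).Nodup) :
    ((bd.filter (fun p => PySem.Set.contains S p.1)).map (fun p => p.2)).sum
      = (S.map (fun l => PySem.Dict.getD (PySem.Dict.mk bd) l 0)).sum := by
  induction bd with
  | nil =>
    have : ∀ l, PySem.Dict.getD (PySem.Dict.mk ([] : List (String × Int))) l 0 = 0 := fun _ => rfl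
    simp [this]
  | cons p rest ih =>
    obtain ⟨k, v⟩ := p
    simp only [List.map_cons, List.nodup_cons] at hbd
    have hpoint : ∀ l, PySem.Dict.getD (PySem.Dict.mk ((k, v) :: rest)) l 0
        = (if l = k then v else 0) + PySem.Dict.getD (PySem.Dict.mk rest) l 0 := by
      intro l
      rw [PySem.Dict.getD_eq_get?_getD, PySem.Dict.get?_mk_cons]
      by_cases hlk : l = k
      · subst hlk
        rw [if_pos (by simp), pv_getD_not_mem rest l hbd.1]
        simp
      · rw [if_neg (by simp [Ne.symm hlk]), ← PySem.Dict.getD_eq_get?_getD]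
        simp [hlk]
    have hsplit : (S.map (fun l => PySem.Dict.getD (PySem.Dict.mk ((k, v) :: rest)) l 0)).sum
        = (S.map (fun l => if l = k then v else 0)).sum
          + (S.map (fun l => PySem.Dict.getD (PySem.Dict.mk rest) l 0)).sum := by
      calc (S.map (fun l => PySem.Dict.getD (PySem.Dict.mk ((k, v) :: rest)) l 0)).sum
          = (S.map (fun l => (if l = k then v else 0) + PySem.Dict.getD (PySem.Dict.mk rest) l 0)).sum := by
            simp only [hpoint]
        _ = _ := by
            induction S with
            | nil => simp
            | cons s t iht => simp at iht ⊢; omega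
    rw [hsplit, pv_sum_indicator S k v hS, ← ih hbd.2]
    by_cases hmem : k ∈ S
    · simp [PySem.Set.contains, hmem]
    · simp [PySem.Set.contains, hmem]

-- the normalized labels of L, in order (what A's comprehension feeds Set.ofList)
def pvNorms (L : List String) : List String :=
  (L.filter (fun label => PySem.Str.strip label ≠ "")).map
    (fun label => PySem.Str.lower (PySem.Str.strip label))

-- B's loop body as a named step function (for the lemmas below)
def pvStep (d : PySem.Dict String Int) (st : PySem.Set String × Int) (label : String) :
    PySem.Set String × Int :=
  let norm := PySem.Str.lower (PySem.Str.strip label)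
  if norm = "" ∨ PySem.Set.contains st.1 norm then st
  else (PySem.Set.add st.1 norm, st.2 + PySem.Dict.getD d norm 0)

-- Set.update only appends: the old set is a prefix
theorem pv_update_append (xs : List String) (s : PySem.Set String) :
    ∃ e, PySem.Set.update s xs = s ++ e := by
  induction xs generalizing s with
  | nil => exact ⟨[], by simp [PySem.Set.update]⟩
  | cons x rest ih =>
    by_cases hx : x ∈ s
    · have hadd : PySem.Set.add s x = s := by simp [PySem.Set.add, hx]
      obtain ⟨e, he⟩ := ih s
      refine ⟨e, ?_⟩
      show (x :: rest).foldl PySem.Set.add s = s ++ e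
      rw [List.foldl_cons, hadd]
      exact he
    · have hadd : PySem.Set.add s x = s ++ [x] := by simp [PySem.Set.add, hx]
      obtain ⟨e, he⟩ := ih (s ++ [x])
      refine ⟨x :: e, ?_⟩
      show (x :: rest).foldl PySem.Set.add s = s ++ x :: e
      rw [List.foldl_cons, hadd]
      simpa using he

-- B's fold from an arbitrary state: the seen set becomes Set.update, and the
-- total grows by one breakdown probe per newly appended element
theorem pv_fold (d : PySem.Dict String Int) (L : List String)
    (s : PySem.Set String) (t : Int) :
    L.foldl (pvStep d) (s, t)
    = (PySem.Set.update s (pvNorms L),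
       t + (((PySem.Set.update s (pvNorms L)).drop s.length).map
              (fun l => PySem.Dict.getD d l 0)).sum) := by
  induction L generalizing s t with
  | nil => simp [pvNorms, PySem.Set.update]
  | cons x rest ih =>
    rw [List.foldl_cons]
    by_cases hs : PySem.Str.strip x = ""
    · have hn : PySem.Str.lower (PySem.Str.strip x) = "" := by
        rw [pv_lower_eq_empty_iff, hs]
      have hnorm : pvNorms (x :: rest) = pvNorms rest := by simp [pvNorms, hs]
      have hstep : pvStep d (s, t) x = (s, t) := by simp [pvStep, hn]
      rw [hstep, hnorm]
      exact ih s t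
    · have hn : PySem.Str.lower (PySem.Str.strip x) ≠ "" := by
        rw [Ne, pv_lower_eq_empty_iff]; exact hs
      have hnorm : pvNorms (x :: rest)
          = PySem.Str.lower (PySem.Str.strip x) :: pvNorms rest := by
        simp [pvNorms, hs]
      by_cases hmem : PySem.Str.lower (PySem.Str.strip x) ∈ s
      · have hc : PySem.Set.contains s (PySem.Str.lower (PySem.Str.strip x)) = true := by
          simp [PySem.Set.contains, hmem]
        have hstep : pvStep d (s, t) x = (s, t) := by
          simp [pvStep, PySem.Set.contains, hmem]
        have hadd : PySem.Set.add s (PySem.Str.lower (PySem.Str.strip x)) = s := by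
          simp [PySem.Set.add, hmem]
        have hupd : PySem.Set.update s (pvNorms (x :: rest))
            = PySem.Set.update s (pvNorms rest) := by
          rw [hnorm]
          show (_ :: pvNorms rest).foldl PySem.Set.add s = _
          rw [List.foldl_cons, hadd]
          rfl
        rw [hstep, hupd]
        exact ih s t
      · have hc : PySem.Set.contains s (PySem.Str.lower (PySem.Str.strip x)) = false := by
          simp [PySem.Set.contains, hmem]
      -- the label is new: it is appended to seen and its count probed once
        have hadd : PySem.Set.add s (PySem.Str.lower (PySem.Str.strip x))
            = s ++ [PySem.Str.lower (PySem.Str.strip x)] := by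
          simp [PySem.Set.add, hmem]
        have hstep : pvStep d (s, t) x
            = (s ++ [PySem.Str.lower (PySem.Str.strip x)],
               t + PySem.Dict.getD d (PySem.Str.lower (PySem.Str.strip x)) 0) := by
          simp [pvStep, hn, PySem.Set.contains, hmem]
        have hupd : PySem.Set.update s (pvNorms (x :: rest))
            = PySem.Set.update (s ++ [PySem.Str.lower (PySem.Str.strip x)]) (pvNorms rest) := by
          rw [hnorm]
          show (_ :: pvNorms rest).foldl PySem.Set.add s = _
          rw [List.foldl_cons, hadd]
          rfl
        rw [hstep, ih, hupd]
        obtain ⟨e, he⟩ := pv_update_append (pvNorms rest)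
          (s ++ [PySem.Str.lower (PySem.Str.strip x)])
        rw [he]
        have h1 : ((s ++ [PySem.Str.lower (PySem.Str.strip x)]) ++ e).drop s.length
            = PySem.Str.lower (PySem.Str.strip x) :: e := by
          rw [List.append_assoc, List.drop_append_of_le_length (le_refl _)]
          simp
        have h2 : ((s ++ [PySem.Str.lower (PySem.Str.strip x)]) ++ e).drop
            (s ++ [PySem.Str.lower (PySem.Str.strip x)]).length = e := by
          rw [List.drop_append_of_le_length (le_refl _)]
          simp
        rw [h1, h2]
        simp [add_assoc]

-- ===== VERDICT (by name: the statement is the Claim_ definition above) =====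
theorem high_risk_failure_count_spec : Claim_equal_high_risk_failure_count := by
  intro breakdown high_risk_labels _ hpre
  unfold Spec_high_risk_failure_count
  rw [show high_risk_failure_count_alt breakdown high_risk_labels
        = ((pvLabels high_risk_labels).foldl (pvStep (PySem.Dict.mk breakdown))
            (PySem.Set.empty, 0)).2 from rfl,
      pv_fold]
  simp only [zero_add]
  exact pv_exchange (PySem.Set.ofList (pvNorms (pvLabels high_risk_labels))) breakdown
    (PySem.Set.nodup_ofList _) hpre.2
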